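-- pv_equiv track=rewrite | github.com/jasoncheng7115/jt-doc-tools | app/tools/text_list/router.py | _op_dedup
-- ===== SOURCE A (Python) =====
-- def _op_dedup(lines: list[str], params: dict) -> list[str]:
--     keep = params.get("keep", "first")
--     case_insensitive = bool(params.get("case_insensitive", False))
--     key_fn = (lambda s: s.lower()) if case_insensitive else (lambda s: s)
--     if keep == "last":
--         seen: dict[str, int] = {}
--         for i, ln in enumerate(lines):
--             seen[key_fn(ln)] = i
--         keep_idx = set(seen.values())
--         return [ln for i, ln in enumerate(lines) if i in keep_idx]
--     if keep == "count":
--         # 「列出每筆 + 出現次數」，依首次出現順序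
--         from collections import Counter, OrderedDict
--         order = OrderedDict()
--         for ln in lines:
--             k = key_fn(ln)
--             if k not in order:
--                 order[k] = ln  # 保留首次原文
--         counts = Counter(key_fn(ln) for ln in lines)
--         return [f"{counts[k]}\t{order[k]}" for k in order]
--     # default: keep first
--     seen_set: set[str] = set()
--     out: list[str] = []
--     for ln in lines:
--         k = key_fn(ln)
--         if k in seen_set:
--             continue
--         seen_set.add(k)
--         out.append(ln)
--     return out
-- ===== SOURCE B (Python) =====
-- def _op_dedup(lines: list[str], params: dict) -> list[str]:
--     keep = params.get("keep", "first")
--     case_insensitive = bool(params.get("case_insensitive", False))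
--     key_fn = (lambda s: s.lower()) if case_insensitive else (lambda s: s)
--     if keep == "last":
--         # single reverse pass: the first time a key is seen (scanning backwards)
--         # is its last occurrence; collect, then restore original order
--         seen: set[str] = set()
--         out: list[str] = []
--         for ln in reversed(lines):
--             k = key_fn(ln)
--             if k in seen:
--                 continue
--             seen.add(k)
--             out.append(ln)
--         out.reverse()
--         return out
--     if keep == "count":
--         # single forward pass: one dict key -> [count, first original line]
--         agg: dict[str, list] = {}
--         for ln in lines:
--             k = key_fn(ln)
--             if k in agg:
--                 agg[k][0] += 1
--             else:
--                 agg[k] = [1, ln]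
--         return [f"{c}\t{first}" for c, first in agg.values()]
--     # default: keep first, via an insertion-ordered dict keyed by key_fn
--     d: dict[str, str] = {}
--     for ln in lines:
--         d.setdefault(key_fn(ln), ln)
--     return list(d.values())
-- ===== Notes on version B (the rewrite author's own statement) =====
-- stated objective: simpler
-- what changed: keep='last' becomes a single reverse pass with a seen set (reversed at the end) instead of a last-index dict plus an index-set filter pass, and keep='count' becomes one forward pass over a single dict key->[count, first line] instead of the two-pass OrderedDict+Counter; the default branch uses dict.setdefault insertion order instead of a seen set with an output list.
import Mathlib
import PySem

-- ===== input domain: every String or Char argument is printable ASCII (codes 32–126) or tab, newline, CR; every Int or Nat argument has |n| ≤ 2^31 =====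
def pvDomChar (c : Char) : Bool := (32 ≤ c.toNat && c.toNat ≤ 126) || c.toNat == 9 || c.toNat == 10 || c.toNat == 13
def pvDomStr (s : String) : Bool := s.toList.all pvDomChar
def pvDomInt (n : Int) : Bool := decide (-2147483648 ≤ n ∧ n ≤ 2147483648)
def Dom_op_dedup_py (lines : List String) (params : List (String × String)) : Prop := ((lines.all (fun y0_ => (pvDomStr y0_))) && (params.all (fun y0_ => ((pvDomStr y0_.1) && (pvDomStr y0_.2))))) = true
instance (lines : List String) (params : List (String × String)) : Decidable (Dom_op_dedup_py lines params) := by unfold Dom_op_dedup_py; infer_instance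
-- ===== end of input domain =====

-- B differs from A by decomposition: one reverse pass (seen set) for keep='last', one
-- forward dict pass key -> (count, first line) for keep='count', dict.setdefault for the
-- default branch; same return value, no side effects in either.

-- key_fn of both Pythons (s.lower() when case_insensitive else identity)
def pvKey (ci : Bool) (s : String) : String := if ci then PySem.Str.lower s else s

-- ===== PORT A =====
def op_dedup_py (lines : List String) (params : List (String × String)) : List String :=
  let p := PySem.Dict.ofList params
  let keep := p.getD "keep" "first"
  let ci : Bool := match p.get? "case_insensitive" with
    | none => false
    | some s => decide (s ≠ "")
  if keep == "last" then
    let seen : PySem.Dict String Int :=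
      (PySem.List.enumerate lines 0).foldl (fun d q => d.insert (pvKey ci q.2) q.1) PySem.Dict.empty
    let keepIdx : PySem.Set Int := PySem.Set.ofList seen.values
    ((PySem.List.enumerate lines 0).filter (fun q => keepIdx.contains q.1)).map (fun q => q.2)
  else if keep == "count" then
    let order : PySem.Dict String String :=
      lines.foldl (fun d ln => if d.contains (pvKey ci ln) then d else d.insert (pvKey ci ln) ln)
        PySem.Dict.empty
    let counts : PySem.Dict String Int := PySem.Dict.counter (lines.map (pvKey ci))
    -- 'counts[k]'/'order[k]': k always present (k ranges over order's keys), so getD's default is unreachable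
    order.keys.map (fun k => PySem.Int.toStr (counts.getD k 0) ++ "\t" ++ order.getD k "")
  else
    (lines.foldl (fun (st : PySem.Set String × List String) ln =>
        if st.1.contains (pvKey ci ln) then st else (st.1.add (pvKey ci ln), st.2 ++ [ln]))
      (PySem.Set.empty, [])).2

-- ===== PORT B =====
def op_dedup_py_alt (lines : List String) (params : List (String × String)) : List String :=
  let p := PySem.Dict.ofList params
  let keep := p.getD "keep" "first"
  let ci : Bool := match p.get? "case_insensitive" with
    | none => false
    | some s => decide (s ≠ "")
  if keep == "last" then
    let st := lines.reverse.foldl (fun (st : PySem.Set String × List String) ln =>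
        if st.1.contains (pvKey ci ln) then st else (st.1.add (pvKey ci ln), st.2 ++ [ln]))
      (PySem.Set.empty, [])
    st.2.reverse
  else if keep == "count" then
    let agg : PySem.Dict String (Int × String) :=
      lines.foldl (fun d ln =>
        match d.get? (pvKey ci ln) with
        | some cf => d.insert (pvKey ci ln) (cf.1 + 1, cf.2)
        | none => d.insert (pvKey ci ln) (1, ln)) PySem.Dict.empty
    agg.values.map (fun cf => PySem.Int.toStr cf.1 ++ "\t" ++ cf.2)
  else
    (lines.foldl (fun d ln => d.setdefault (pvKey ci ln) ln)
      (PySem.Dict.empty : PySem.Dict String String)).values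

-- ===== PRECONDITION & SPEC =====
def Spec_op_dedup_py (lines : List String) (params : List (String × String)) (out : List String) : Prop := out = op_dedup_py_alt lines params
instance (lines : List String) (params : List (String × String)) (out : List String) : Decidable (Spec_op_dedup_py lines params out) := by unfold Spec_op_dedup_py; infer_instance

-- ===== CLAIM (what is proved, stated in full; the proofs are below) =====
def Claim_equal_op_dedup_py : Prop := ∀ (lines : List String) (params : List (String × String)), Dom_op_dedup_py lines params → Spec_op_dedup_py lines params (op_dedup_py lines params)

-- ===== LEMMAS AND PROOFS =====

-- the seen-set/output-list pair loop shared by A's default branch and B's 'last' branch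
def pvStep (kf : String → String) (st : PySem.Set String × List String) (ln : String) :
    PySem.Set String × List String :=
  if st.1.contains (kf ln) then st else (st.1.add (kf ln), st.2 ++ [ln])

-- structural form of the lines the pair loop emits
def pvDDF (kf : String → String) : PySem.Set String → List String → List String
  | _, [] => []
  | s, x :: t => if s.contains (kf x) then pvDDF kf s t else x :: pvDDF kf (s.add (kf x)) t

lemma pv_foldPair (kf : String → String) (ys : List String) :
    ∀ (s : PySem.Set String) (out : List String),
      ys.foldl (pvStep kf) (s, out) = ((ys.map kf).foldl PySem.Set.add s, out ++ pvDDF kf s ys) := by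
  induction ys with
  | nil => intro s out; simp [pvDDF]
  | cons x t ih =>
    intro s out
    by_cases h : kf x ∈ s <;>
      simp [pvStep, pvDDF, PySem.Set.add, PySem.Set.contains, List.contains_eq_mem, h, ih]

lemma pv_ddf_append (kf : String → String) (ys : List String) (y : String) :
    ∀ s : PySem.Set String, pvDDF kf s (ys ++ [y]) =
      pvDDF kf s ys ++ (if kf y ∈ s ∨ kf y ∈ ys.map kf then [] else [y]) := by
  induction ys with
  | nil =>
    intro s
    by_cases h : kf y ∈ s <;>
      simp [pvDDF, PySem.Set.contains, List.contains_eq_mem, h]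
  | cons x t ih =>
    intro s
    by_cases h : s.contains (kf x) = true
    · have hx : kf x ∈ s := by simpa [PySem.Set.contains, List.contains_eq_mem] using h
      by_cases hy : kf y = kf x
      · simp [pvDDF, h, ih, hy, hx]
      · simp only [List.cons_append, pvDDF, h, if_true, ih]
        congr 1
        simp only [List.map_cons, List.mem_cons]
        by_cases hys : kf y ∈ s ∨ kf y ∈ t.map kf
        · rcases hys with h1 | h1 <;> simp [h1]
        · push_neg at hys
          simp [hys.1, hys.2, hy]
    · simp only [List.cons_append, pvDDF, h, if_false, ih]
      congr 2
      simp only [PySem.Set.mem_add, List.map_cons, List.mem_cons]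
      by_cases h1 : kf y ∈ s
      · simp [h1]
      · by_cases h2 : kf y = kf x <;> simp [h1, h2]

-- Bool test: p is the LAST occurrence of its key among the enumerated pairs
def pvIsLast (kf : String → String) (t : List String) (s : Int) (p : Int × String) : Bool :=
  (PySem.List.enumerate t s).all (fun q => if p.1 < q.1 then !(kf q.2 == kf p.2) else true)

lemma pv_isLast_iff (kf : String → String) (t : List String) (s : Int) (p : Int × String) :
    pvIsLast kf t s p = true ↔
      ∀ q ∈ PySem.List.enumerate t s, p.1 < q.1 → kf q.2 ≠ kf p.2 := by
  simp only [pvIsLast, List.all_eq_true]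
  constructor
  · intro h q hq hlt
    have := h q hq
    simpa [hlt] using this
  · intro h q hq
    by_cases hlt : p.1 < q.1
    · simp [hlt, h q hq hlt]
    · simp [hlt]

lemma pv_fst_ge_of_mem_enumerate {α : Type} (t : List α) (s : Int) (q : Int × α)
    (hq : q ∈ PySem.List.enumerate t s) : s ≤ q.1 := by
  rcases (PySem.List.mem_enumerate_iff t s q).1 hq with ⟨k, hk, rfl⟩
  simp

-- B's 'last' branch equals the last-occurrence filter over enumerate
lemma pv_alt_last (kf : String → String) :
    ∀ (t : List String) (s : Int),
      (pvDDF kf PySem.Set.empty t.reverse).reverse =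
        ((PySem.List.enumerate t s).filter (pvIsLast kf t s)).map (fun q => q.2) := by
  intro t
  induction t with
  | nil => intro s; simp [pvDDF, PySem.List.enumerate_nil]
  | cons x tl ih =>
    intro s
    have hrw : pvDDF kf PySem.Set.empty ((x :: tl).reverse) =
        pvDDF kf PySem.Set.empty tl.reverse ++
          (if kf x ∈ tl.map kf then [] else [x]) := by
      have := pv_ddf_append kf tl.reverse x PySem.Set.empty
      simp only [List.reverse_cons] at *
      rw [this]
      congr 1
      have : (kf x ∈ (PySem.Set.empty : PySem.Set String) ∨ kf x ∈ tl.reverse.map kf) ↔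
          kf x ∈ tl.map kf := by
        simp [PySem.Set.empty, ← List.map_reverse]
      by_cases h : kf x ∈ tl.map kf <;> simp [this, h]
    -- head pair test
    have hhead : pvIsLast kf (x :: tl) s (s, x) = true ↔ ¬ kf x ∈ tl.map kf := by
      rw [pv_isLast_iff]
      simp only [PySem.List.enumerate_cons, List.mem_cons]
      constructor
      · intro h hmem
        rcases List.mem_map.1 hmem with ⟨y, hy, hky⟩
        rcases List.mem_iff_getElem.1 hy with ⟨k, hk, rfl⟩
        have hq : ((s + 1 + (k : Int)), tl[k]) ∈ PySem.List.enumerate tl (s + 1) :=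
          (PySem.List.mem_enumerate_iff tl (s+1) _).2 ⟨k, hk, rfl⟩
        exact h _ (Or.inr hq) (by omega) hky
      · intro h q hq hlt
        rcases hq with rfl | hq
        · omega
        · intro hkeq
          apply h
          apply List.mem_map.2
          refine ⟨q.2, ?_, hkeq⟩
          have hs := PySem.List.map_snd_enumerate tl (s+1)
          have hq2 : q.2 ∈ (PySem.List.enumerate tl (s+1)).map (fun r => r.2) :=
            List.mem_map_of_mem hq
          rwa [hs] at hq2
    -- tail pairs: the head pair never matters (its index is below every tail index)
    have htail : ∀ q ∈ PySem.List.enumerate tl (s+1),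
        pvIsLast kf (x :: tl) s q = pvIsLast kf tl (s+1) q := by
      intro q hq
      have hgq := pv_fst_ge_of_mem_enumerate tl (s+1) q hq
      simp only [pvIsLast, PySem.List.enumerate_cons, List.all_cons]
      have : (if q.1 < s then !(kf x == kf q.2) else true) = true := by
        have : ¬ q.1 < s := by omega
        simp [this]
      simp [this]
    rw [hrw, List.reverse_append, PySem.List.enumerate_cons, List.filter_cons,
      List.filter_congr htail]
    by_cases hx : kf x ∈ tl.map kf
    · have h1 : pvIsLast kf (x :: tl) s (s, x) = false := by
        cases hb : pvIsLast kf (x :: tl) s (s, x)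
        · rfl
        · exact absurd (hhead.1 hb) (not_not_intro hx)
      have ih' := ih (s+1)
      simp only [PySem.Set.empty] at ih'
      simp [hx, h1, ih']
    · have h1 : pvIsLast kf (x :: tl) s (s, x) = true := hhead.2 hx
      have ih' := ih (s+1)
      simp only [PySem.Set.empty] at ih'
      simp [hx, h1, ih']

-- ----- A's 'last' branch -----

def pvSeen (kf : String → String) (lines : List String) : PySem.Dict String Int :=
  (PySem.List.enumerate lines 0).foldl (fun d q => d.insert (kf q.2) q.1) PySem.Dict.empty

lemma pv_seen_append (kf : String → String) (xs : List String) (x : String) :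
    pvSeen kf (xs ++ [x]) = (pvSeen kf xs).insert (kf x) (xs.length : Int) := by
  simp [pvSeen, PySem.List.enumerate_append, PySem.List.enumerate_cons, PySem.List.enumerate_nil]

lemma pv_seen_nodup (kf : String → String) (lines : List String) :
    (pvSeen kf lines).keys.Nodup := by
  unfold pvSeen
  exact PySem.Dict.nodup_keys_foldl_insert_key (PySem.List.enumerate lines 0)
    (fun (q : Int × String) => kf q.2) (fun _ q => q.1) PySem.Dict.empty (by simp)

-- characterization of the last-index dict
lemma pv_seen_get (kf : String → String) (lines : List String) (key : String) (i : Int) :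
    (pvSeen kf lines).get? key = some i ↔
      ∃ (k : Nat) (h : k < lines.length), i = (k : Int) ∧ kf lines[k] = key ∧
        ∀ (j : Nat) (hj : j < lines.length), k < j → kf lines[j] ≠ key := by
  induction lines using List.reverseRecOn with
  | nil => simp [pvSeen, PySem.List.enumerate_nil, PySem.Dict.get?_empty]
  | append_singleton xs x ih =>
    rw [pv_seen_append]
    by_cases hk : key = kf x
    · subst hk
      rw [PySem.Dict.get?_insert_self]
      constructor
      · rintro h
        have hi : i = (xs.length : Int) := by simpa using h.symm
        refine ⟨xs.length, by simp, hi, ?_, ?_⟩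
        · simp [List.getElem_append_right (le_refl xs.length)]
        · intro j hj hlt
          simp at hj; omega
      · rintro ⟨k, hklt, hi, hkey, hlast⟩
        have hkn : k = xs.length := by
          by_contra hne
          have hklt' : k < xs.length := by simp at hklt; omega
          have hx : kf (xs ++ [x])[xs.length] = kf x := by
            simp [List.getElem_append_right (le_refl xs.length)]
          exact hlast xs.length (by simp) (by omega) hx
        subst hkn
        simp [hi]
    · rw [PySem.Dict.get?_insert_of_ne _ _ hk, ih]
      constructor
      · rintro ⟨k, hklt, hi, hkey, hlast⟩
        refine ⟨k, by simp; omega, hi, ?_, ?_⟩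
        · rw [List.getElem_append_left hklt]; exact hkey
        · intro j hj hlt
          by_cases hjx : j < xs.length
          · rw [List.getElem_append_left hjx]; exact hlast j hjx hlt
          · have : j = xs.length := by simp at hj; omega
            subst this
            rw [List.getElem_append_right (le_refl xs.length)]
            simpa using fun h => hk h.symm
      · rintro ⟨k, hklt, hi, hkey, hlast⟩
        have hkx : k < xs.length := by
          by_contra hge
          have : k = xs.length := by simp at hklt; omega
          subst this
          rw [List.getElem_append_right (le_refl xs.length)] at hkey
          simp at hkey
          exact hk hkey.symm
        refine ⟨k, hkx, hi, ?_, ?_⟩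
        · rw [List.getElem_append_left hkx] at hkey; exact hkey
        · intro j hj hlt
          have := hlast j (by simp; omega) hlt
          rwa [List.getElem_append_left hj] at this
-- membership in a dict's values, for nodup keys
lemma pv_mem_values {ν : Type} (d : PySem.Dict String ν) (hnd : d.keys.Nodup) (v : ν) :
    v ∈ d.values ↔ ∃ key, d.get? key = some v := by
  simp only [PySem.Dict.values, List.mem_map]
  constructor
  · rintro ⟨p, hp, rfl⟩
    exact ⟨p.1, PySem.Dict.get?_of_mem_items d hp hnd⟩
  · rintro ⟨key, hget⟩
    exact ⟨(key, v), PySem.Dict.mem_items_of_get?_eq_some d hget, rfl⟩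

-- A's 'last' branch equals the same last-occurrence filter
lemma pv_a_last (kf : String → String) (lines : List String) :
    ((PySem.List.enumerate lines 0).filter
        (fun q => PySem.Set.contains (PySem.Set.ofList (pvSeen kf lines).values) q.1)).map (fun q => q.2) =
      ((PySem.List.enumerate lines 0).filter (pvIsLast kf lines 0)).map (fun q => q.2) := by
  congr 1
  apply List.filter_congr
  intro q hq
  rcases (PySem.List.mem_enumerate_iff lines 0 q).1 hq with ⟨k, hklt, rfl⟩
  apply Bool.eq_iff_iff.2
  rw [pv_isLast_iff]
  simp only [PySem.Set.contains, List.contains_eq_mem, decide_eq_true_eq, PySem.Set.mem_ofList]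
  rw [pv_mem_values _ (pv_seen_nodup kf lines)]
  constructor
  · rintro ⟨key, hget⟩
    rcases (pv_seen_get kf lines key _).1 hget with ⟨k', hk', hi, hkey, hlast⟩
    have hkk : k' = k := by simp at hi; omega
    subst hkk
    intro p hp hlt
    rcases (PySem.List.mem_enumerate_iff lines 0 p).1 hp with ⟨j, hj, rfl⟩
    subst hkey
    exact hlast j hj (by simp at hlt; omega)
  · intro h
    refine ⟨kf lines[k], (pv_seen_get kf lines _ _).2 ⟨k, hklt, by simp, rfl, ?_⟩⟩
    intro j hj hlt
    exact h ((0:Int) + (j:Int), lines[j]) ((PySem.List.mem_enumerate_iff lines 0 _).2 ⟨j, hj, rfl⟩)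
      (by simp; omega)

-- ----- default branch -----
lemma pv_add_mem {s : PySem.Set String} {k : String} (h : k ∈ s) :
    PySem.Set.add s k = s := by
  simp [PySem.Set.add, PySem.Set.contains, List.contains_eq_mem, h]

lemma pv_add_not_mem {s : PySem.Set String} {k : String} (h : ¬ k ∈ s) :
    PySem.Set.add s k = s ++ [k] := by
  simp [PySem.Set.add, PySem.Set.contains, List.contains_eq_mem, h]

lemma pv_first (kf : String → String) (lines : List String) :
    ∀ d : PySem.Dict String String, d.keys.Nodup →
      (lines.foldl (pvStep kf) (d.keys, d.values)).2 =
        (lines.foldl (fun d ln => d.setdefault (kf ln) ln) d).values := by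
  induction lines with
  | nil => intro d _; simp
  | cons x t ih =>
    intro d hnd
    by_cases hc : d.contains (kf x) = true
    · have hkc : PySem.Set.contains d.keys (kf x) = true := by
        rw [PySem.Dict.contains_eq_decide_mem_keys] at hc
        simpa [PySem.Set.contains, List.contains_eq_mem] using hc
      simp only [List.foldl_cons, pvStep, hkc, if_true, PySem.Dict.setdefault, hc]
      exact ih d hnd
    · have hmem : ¬ kf x ∈ d.keys := by
        rw [PySem.Dict.contains_eq_decide_mem_keys] at hc; simpa using hc
      have hstep : pvStep kf (d.keys, d.values) x = (d.keys ++ [kf x], d.values ++ [x]) := by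
        simp [pvStep, PySem.Set.add, PySem.Set.contains, List.contains_eq_mem, hmem]
      have hsd : d.setdefault (kf x) x = PySem.Dict.mk (d.items ++ [(kf x, x)]) := by
        simp [PySem.Dict.setdefault, hc]
      have hk2 : (PySem.Dict.mk (d.items ++ [(kf x, x)]) : PySem.Dict String String).keys
          = d.keys ++ [kf x] := by
        simp [PySem.Dict.keys]
      have hv2 : (PySem.Dict.mk (d.items ++ [(kf x, x)]) : PySem.Dict String String).values
          = d.values ++ [x] := by
        simp [PySem.Dict.values]
      have hnd2 : (PySem.Dict.mk (d.items ++ [(kf x, x)]) : PySem.Dict String String).keys.Nodup := by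
        rw [hk2]
        apply List.Nodup.append hnd (List.nodup_singleton _)
        intro a ha hb
        simp only [List.mem_singleton] at hb
        exact hmem (hb ▸ ha)
      simp only [List.foldl_cons, hstep, hsd]
      rw [← hk2, ← hv2]
      exact ih _ hnd2

-- ----- 'count' branch -----
def pvOrder (kf : String → String) (lines : List String) : PySem.Dict String String :=
  lines.foldl (fun d ln => if d.contains (kf ln) then d else d.insert (kf ln) ln) PySem.Dict.empty

def pvAgg (kf : String → String) (lines : List String) : PySem.Dict String (Int × String) :=
  lines.foldl (fun d ln =>
    match d.get? (kf ln) with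
    | some cf => d.insert (kf ln) (cf.1 + 1, cf.2)
    | none => d.insert (kf ln) (1, ln)) PySem.Dict.empty

lemma pv_order_append (kf : String → String) (xs : List String) (x : String) :
    pvOrder kf (xs ++ [x]) =
      (if (pvOrder kf xs).contains (kf x) = true then pvOrder kf xs
       else (pvOrder kf xs).insert (kf x) x) := by
  simp [pvOrder, List.foldl_append]

lemma pv_agg_append (kf : String → String) (xs : List String) (x : String) :
    pvAgg kf (xs ++ [x]) =
      (match (pvAgg kf xs).get? (kf x) with
       | some cf => (pvAgg kf xs).insert (kf x) (cf.1 + 1, cf.2)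
       | none => (pvAgg kf xs).insert (kf x) (1, x)) := by
  simp [pvAgg, List.foldl_append]

lemma pv_ofList_append (xs : List String) (k : String) :
    PySem.Set.ofList (xs ++ [k]) = PySem.Set.add (PySem.Set.ofList xs) k := by
  simp [PySem.Set.ofList_eq_foldl, List.foldl_append]

lemma pv_order_keys (kf : String → String) (lines : List String) :
    (pvOrder kf lines).keys = PySem.Set.ofList (lines.map kf) := by
  induction lines using List.reverseRecOn with
  | nil => simp [pvOrder, PySem.Set.ofList_eq_foldl, PySem.Dict.keys, PySem.Dict.empty]
  | append_singleton xs x ih =>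
    rw [pv_order_append, List.map_append, List.map_singleton, pv_ofList_append]
    by_cases hc : (pvOrder kf xs).contains (kf x) = true
    · have hmem : kf x ∈ PySem.Set.ofList (xs.map kf) := by
        rw [PySem.Dict.contains_eq_decide_mem_keys, ih] at hc; simpa using hc
      rw [if_pos hc, ih, pv_add_mem hmem]
    · have hmem : ¬ kf x ∈ PySem.Set.ofList (xs.map kf) := by
        rw [PySem.Dict.contains_eq_decide_mem_keys, ih] at hc; simpa using hc
      rw [if_neg hc, PySem.Dict.keys_insert_of_not_contains _ _ (by simpa using hc), ih,
        pv_add_not_mem hmem]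

lemma pv_order_nodup (kf : String → String) (lines : List String) :
    (pvOrder kf lines).keys.Nodup := by
  rw [pv_order_keys]; exact PySem.Set.nodup_ofList _

lemma pv_agg_items (kf : String → String) (lines : List String) :
    (pvAgg kf lines).items = (pvOrder kf lines).items.map
      (fun p => (p.1, (((lines.map kf).count p.1 : Int), p.2))) := by
  induction lines using List.reverseRecOn with
  | nil => simp [pvAgg, pvOrder, PySem.Dict.empty]
  | append_singleton xs x ih =>
    have hordnd := pv_order_nodup kf xs
    have haggkeys : (pvAgg kf xs).keys = (pvOrder kf xs).keys := by
      simp [PySem.Dict.keys, ih, List.map_map, Function.comp]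
    have haggnd : (pvAgg kf xs).keys.Nodup := by rw [haggkeys]; exact hordnd
    rw [pv_agg_append, pv_order_append]
    by_cases hc : (pvOrder kf xs).contains (kf x) = true
    · -- key already present: order unchanged, agg overwrites (count+1, same first line)
      obtain ⟨v, hget⟩ : ∃ v, (pvOrder kf xs).get? (kf x) = some v := by
        rw [PySem.Dict.contains_eq_isSome_get?] at hc
        exact Option.isSome_iff_exists.1 hc
      have hitem : (kf x, v) ∈ (pvOrder kf xs).items :=
        PySem.Dict.mem_items_of_get?_eq_some _ hget
      have hgagg : (pvAgg kf xs).get? (kf x) =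
          some (((xs.map kf).count (kf x) : Int), v) := by
        apply PySem.Dict.get?_of_mem_items _ _ haggnd
        rw [ih]
        exact List.mem_map.2 ⟨(kf x, v), hitem, rfl⟩
      have hcagg : (pvAgg kf xs).contains (kf x) = true := by
        rw [PySem.Dict.contains_eq_isSome_get?, hgagg]; rfl
      rw [if_pos hc, hgagg]
      simp only [PySem.Dict.insert, hcagg, if_true]
      show ((pvAgg kf xs).items.map _) = _
      rw [ih, List.map_map]
      apply List.map_congr_left
      intro p hp
      by_cases hpx : p.1 = kf x
      · have hgp : (pvOrder kf xs).get? p.1 = some p.2 :=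
          PySem.Dict.get?_of_mem_items _ (by simpa using hp) hordnd
        rw [hpx, hget] at hgp
        have hp2 : p.2 = v := (Option.some.inj hgp).symm
        have hcnt : ((xs ++ [x]).map kf).count (kf x) = (xs.map kf).count (kf x) + 1 := by
          simp [List.count_append]
        simp [Function.comp, hpx, hp2, hcnt]
      · have hpx' : ¬ kf x = p.1 := fun h => hpx h.symm
        have h0 : List.count p.1 [kf x] = 0 := List.count_eq_zero.2 (by simpa using hpx)
        have hcnt : ((xs ++ [x]).map kf).count p.1 = (xs.map kf).count p.1 := by
          simp [List.count_append, h0]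
        simp [Function.comp, hpx, hcnt, h0]
    · -- fresh key: both dicts append
      have hmemk : ¬ kf x ∈ (pvOrder kf xs).keys := by
        rw [PySem.Dict.contains_eq_decide_mem_keys] at hc; simpa using hc
      have hnolist : ¬ kf x ∈ xs.map kf := by
        rw [pv_order_keys] at hmemk; simpa [PySem.Set.mem_ofList] using hmemk
      have hcaggF : (pvAgg kf xs).contains (kf x) = false := by
        rw [PySem.Dict.contains_eq_decide_mem_keys, haggkeys]
        simpa using hmemk
      have hgagg : (pvAgg kf xs).get? (kf x) = none :=
        (PySem.Dict.get?_eq_none_iff_contains _ _).2 hcaggF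
      have hcF : (pvOrder kf xs).contains (kf x) = false := by simpa using hc
      rw [if_neg hc, hgagg]
      simp only [PySem.Dict.insert, hcaggF, hcF, Bool.false_eq_true, if_false]
      show ((pvAgg kf xs).items ++ [(kf x, (1, x))] : List (String × (Int × String)))
          = ((pvOrder kf xs).items ++ [(kf x, x)]).map _
      rw [List.map_append, ih]
      congr 1
      · apply List.map_congr_left
        intro p hp
        have hpkey : p.1 ∈ (pvOrder kf xs).keys :=
          List.mem_map.2 ⟨p, by simpa using hp, rfl⟩
        have hpx : p.1 ≠ kf x := fun h => hmemk (h ▸ hpkey)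
        have h0 : List.count p.1 [kf x] = 0 := List.count_eq_zero.2 (by simpa using hpx)
        have hcnt : ((xs ++ [x]).map kf).count p.1 = (xs.map kf).count p.1 := by
          simp [List.count_append, h0]
        rw [hcnt]
      · have h0 : (xs.map kf).count (kf x) = 0 := List.count_eq_zero.2 hnolist
        simp [List.count_append, h0]

-- ===== VERDICT (by name: the statement is the Claim_ definition above) =====
theorem op_dedup_py_spec : Claim_equal_op_dedup_py := by
  intro lines params _
  unfold Spec_op_dedup_py op_dedup_py op_dedup_py_alt
  dsimp only
  generalize (PySem.Dict.ofList params).getD "keep" "first" = keep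
  generalize hci : (match (PySem.Dict.ofList params).get? "case_insensitive" with
    | none => false
    | some s => decide (s ≠ "")) = ci
  by_cases h1 : (keep == "last") = true
  · simp only [h1, if_true]
    -- 'last' branch
    have hB := pv_foldPair (pvKey ci) lines.reverse PySem.Set.empty []
    have hBv : (lines.reverse.foldl (fun (st : PySem.Set String × List String) ln =>
        if st.1.contains (pvKey ci ln) then st
        else (st.1.add (pvKey ci ln), st.2 ++ [ln])) (PySem.Set.empty, [])).2
        = pvDDF (pvKey ci) PySem.Set.empty lines.reverse := by
      rw [show (fun (st : PySem.Set String × List String) ln =>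
        if st.1.contains (pvKey ci ln) then st
        else (st.1.add (pvKey ci ln), st.2 ++ [ln])) = pvStep (pvKey ci) from rfl, hB]
      simp
    rw [hBv, pv_alt_last (pvKey ci) lines 0]
    exact pv_a_last (pvKey ci) lines
  · simp only [h1, if_false]
    by_cases h2 : (keep == "count") = true
    · simp only [h2, if_true]
      -- 'count' branch
      simp only [show (List.foldl (fun d ln => if d.contains (pvKey ci ln) then d
          else d.insert (pvKey ci ln) ln) PySem.Dict.empty lines) = pvOrder (pvKey ci) lines
          from rfl,
        show (List.foldl (fun d ln => match d.get? (pvKey ci ln) with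
          | some cf => d.insert (pvKey ci ln) (cf.1 + 1, cf.2)
          | none => d.insert (pvKey ci ln) (1, ln))
          (PySem.Dict.empty : PySem.Dict String (Int × String)) lines) = pvAgg (pvKey ci) lines
          from rfl]
      have hend := pv_agg_items (pvKey ci) lines
      have hordnd := pv_order_nodup (pvKey ci) lines
      have hA : (pvOrder (pvKey ci) lines).keys.map
            (fun k => PySem.Int.toStr ((PySem.Dict.counter (lines.map (pvKey ci))).getD k 0)
              ++ "\t" ++ (pvOrder (pvKey ci) lines).getD k "") =
          (pvOrder (pvKey ci) lines).items.map
            (fun q => PySem.Int.toStr (((lines.map (pvKey ci)).count q.1 : Int)) ++ "\t" ++ q.2) := by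
        rw [PySem.Dict.items_eq_map_keys _ hordnd ""]
        simp only [List.map_map]
        apply List.map_congr_left
        intro k _
        simp [Function.comp, PySem.Dict.getD_counter]
      have hBv : (pvAgg (pvKey ci) lines).values.map
            (fun cf => PySem.Int.toStr cf.1 ++ "\t" ++ cf.2) =
          (pvOrder (pvKey ci) lines).items.map
            (fun q => PySem.Int.toStr (((lines.map (pvKey ci)).count q.1 : Int)) ++ "\t" ++ q.2) := by
        simp only [PySem.Dict.values, hend, List.map_map]
        apply List.map_congr_left
        intro q _
        simp [Function.comp]
      show (pvOrder (pvKey ci) lines).keys.map _ = (pvAgg (pvKey ci) lines).values.map _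
      rw [hA, hBv]
    · simp only [h2, if_false]
      -- default 'first' branch
      have h := pv_first (pvKey ci) lines PySem.Dict.empty (by simp)
      simp only [PySem.Dict.keys_empty] at h
      have hv : (PySem.Dict.empty : PySem.Dict String String).values = [] := rfl
      rw [hv] at h
      show (lines.foldl (pvStep (pvKey ci)) ([], [])).2 = _
      exact h
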